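-- pv_equiv track=rewrite | github.com/alexey-gladilin/apidev | src/apidev/application/services/diff_service.py | _has_malformed_glob
-- ===== SOURCE A (Python) =====
-- def _has_malformed_glob(pattern: str) -> bool:
--     inside_class = False
--     escaped = False
--     for char in pattern:
--         if escaped:
--             escaped = False
--             continue
--         if char == "\\":
--             escaped = True
--             continue
--         if char == "[":
--             inside_class = True
--             continue
--         if char == "]" and inside_class:
--             inside_class = False
--     return inside_class
-- ===== SOURCE B (Python) =====
-- import re
--
-- def _has_malformed_glob(pattern: str) -> bool:
--     # Pass 1: remove every escape sequence (backslash + following char).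
--     cleaned = re.sub(r"\\.", "", pattern, flags=re.DOTALL)
--     # Pass 2: simple bracket scan on the cleaned text.
--     inside = False
--     for char in cleaned:
--         if char == "[":
--             inside = True
--         elif char == "]" and inside:
--             inside = False
--     return inside
-- ===== Notes on version B (the rewrite author's own statement) =====
-- stated objective: simpler
-- what changed: B splits A's fused escape-tracking state machine into two passes: a regex pass that deletes all backslash escapes, then a plain bracket scan with a single inside flag.
import Mathlib
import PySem

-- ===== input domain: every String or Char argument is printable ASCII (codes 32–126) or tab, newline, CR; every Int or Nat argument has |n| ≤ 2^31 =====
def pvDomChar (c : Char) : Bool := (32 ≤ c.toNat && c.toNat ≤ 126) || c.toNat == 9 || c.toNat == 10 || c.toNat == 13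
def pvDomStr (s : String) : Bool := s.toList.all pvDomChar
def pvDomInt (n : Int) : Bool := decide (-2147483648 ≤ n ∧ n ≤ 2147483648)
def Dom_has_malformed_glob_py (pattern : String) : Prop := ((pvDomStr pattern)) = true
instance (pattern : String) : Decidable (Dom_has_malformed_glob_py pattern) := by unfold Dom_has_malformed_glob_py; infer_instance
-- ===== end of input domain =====

-- B splits A's fused per-character state machine into an escape-stripping pass followed by a plain bracket scan (objective: simpler decomposition).
-- ===== PORT A =====
-- A's loop: state (inside_class, escaped), one step per character, branches in source order.
def pvALoop : List Char → Bool → Bool → Bool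
  | [], inside, _ => inside
  | c :: rest, inside, escaped =>
    if escaped then pvALoop rest inside false
    else if c = '\\' then pvALoop rest inside true
    else if c = '[' then pvALoop rest true false
    else if c = ']' && inside then pvALoop rest false false
    else pvALoop rest inside false

def has_malformed_glob_py (pattern : String) : Bool :=
  pvALoop pattern.toList false false

-- ===== PORT B =====
-- re.sub(r"\\.", "", pattern, flags=re.DOTALL): delete each backslash together with the
-- following character; a trailing lone backslash is not matched and survives.
def pvStripEsc : List Char → List Char
  | [] => []
  | ['\\'] => ['\\']
  | '\\' :: _ :: rest => pvStripEsc rest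
  | c :: rest => c :: pvStripEsc rest

-- the bracket scan over the cleaned text, with a single `inside` flag
def pvBScan : List Char → Bool → Bool
  | [], inside => inside
  | c :: rest, inside =>
    if c = '[' then pvBScan rest true
    else if c = ']' && inside then pvBScan rest false
    else pvBScan rest inside

def has_malformed_glob_py_alt (pattern : String) : Bool :=
  pvBScan (pvStripEsc pattern.toList) false

-- ===== PRECONDITION & SPEC =====
def Spec_has_malformed_glob_py (pattern : String) (out : Bool) : Prop := out = has_malformed_glob_py_alt pattern
instance (pattern : String) (out : Bool) : Decidable (Spec_has_malformed_glob_py pattern out) := by unfold Spec_has_malformed_glob_py; infer_instance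

-- ===== CLAIM (what is proved, stated in full; the proofs are below) =====
def Claim_equal_has_malformed_glob_py : Prop := ∀ (pattern : String), Dom_has_malformed_glob_py pattern → Spec_has_malformed_glob_py pattern (has_malformed_glob_py pattern)

-- ===== LEMMAS AND PROOFS =====

-- ===== VERDICT (by name: the statement is the Claim_ definition above) =====
-- Core invariant: with `escaped = false`, A's fused loop equals B's scan of the stripped text.
theorem pvALoop_eq_bscan_strip (cs : List Char) (inside : Bool) :
    pvALoop cs inside false = pvBScan (pvStripEsc cs) inside := by
  fun_induction pvStripEsc cs generalizing inside with
  | case1 => simp [pvALoop, pvBScan]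
  | case2 => simp [pvALoop, pvBScan]
  | case3 c rest ih =>
    simp only [pvALoop, if_true]
    exact ih inside
  | case4 c rest h1 h2 ih =>
    have hc : c ≠ '\\' := by
      intro h; subst h
      cases rest with
      | nil => exact h1 rfl rfl
      | cons d ds => exact h2 d ds rfl rfl
    simp only [pvALoop, pvBScan, if_neg hc]
    by_cases hb : c = '['
    · simp [hb, ih]
    · by_cases hr : (c = ']' && inside) = true
      · simp [hb, hr, ih]
      · simp [hb, hr, ih]

theorem has_malformed_glob_py_spec : Claim_equal_has_malformed_glob_py := by
  intro pattern _
  unfold Spec_has_malformed_glob_py has_malformed_glob_py has_malformed_glob_py_alt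
  exact pvALoop_eq_bscan_strip pattern.toList false
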